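-- pv_equiv track=rewrite | github.com/nacase/py-cmpe | cmpe.py | _group_str
-- ===== SOURCE A (Python) =====
-- def _group_str(str,length):
--     """Break up a string into groups of specified length, separated by
--     spaces.  Right justified."""
--     new = ""
--     i = length - (len(str) % length)
--     for c in str:
--         new += c
--         i += 1
--         if (i % length == 0):
--             new += " "
--     return new
-- ===== SOURCE B (Python) =====
-- def _group_str(str, length):
--     """Break a string into length-sized groups separated by spaces,
--     right-justified (a short group comes first)."""
--     off = len(str) % length
--     parts = [str[:off]] if off else []
--     parts += [str[i:i + length] for i in range(off, len(str), length)]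
--     return "".join(p + " " for p in parts)
-- ===== Notes on version B (the rewrite author's own statement) =====
-- stated objective: faster
-- what changed: Replaces the per-character loop with a modular counter (growing the result one char at a time) by direct slice-based chunking: compute the right-justified offset once, take the short head slice and the length-sized slices at range(off, len, length), and join each part followed by a space; Pre_ keeps only positive length (length=0 raises ZeroDivisionError in both, and for negative length a group width is meaningless, so A's counter and B's slicing produce accidental, different spacings there).
-- outside the precondition, e.g. on _group_str('abc', -2): A returns 'a bc ', B returns 'ab '
import Mathlib
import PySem

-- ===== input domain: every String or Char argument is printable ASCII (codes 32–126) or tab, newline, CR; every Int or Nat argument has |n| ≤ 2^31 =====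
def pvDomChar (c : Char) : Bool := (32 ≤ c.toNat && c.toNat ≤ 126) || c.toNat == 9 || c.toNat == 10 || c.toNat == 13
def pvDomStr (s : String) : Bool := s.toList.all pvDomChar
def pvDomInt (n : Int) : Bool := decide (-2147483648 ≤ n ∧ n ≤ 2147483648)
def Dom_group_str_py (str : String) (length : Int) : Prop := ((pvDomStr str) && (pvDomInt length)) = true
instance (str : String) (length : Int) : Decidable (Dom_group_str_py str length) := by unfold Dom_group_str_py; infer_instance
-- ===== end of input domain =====

-- B replaces A's per-character modular counter (one char appended at a time) with slice-based
-- chunking: the right-justified short slice first, then length-sized slices, joined at the end.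

-- ===== PORT A =====
-- literal port of A: accumulate (new, i), append a space whenever i % length == 0
def group_str_py (str : String) (length : Int) : String :=
  let s := str.toList
  let i0 : Int := length - PySem.Int.mod (s.length : Int) length
  let r := s.foldl (fun (acc : List Char × Int) c =>
      let new := acc.1 ++ [c]
      let i := acc.2 + 1
      if PySem.Int.mod i length = 0 then (new ++ [' '], i) else (new, i)) ([], i0)
  String.mk r.1

-- ===== PORT B =====
-- port of B: off = len % length; optional short head slice, then slices at range(off, len, length);
-- join each part followed by a space
def group_str_py_alt (str : String) (length : Int) : String :=
  let s := str.toList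
  let n : Int := s.length
  let off := PySem.Int.mod n length
  let parts : List (List Char) :=
    (if off ≠ 0 then [PySem.List.slice s none (some off)] else [])
    ++ (PySem.List.pyRange off n length).map (fun i => PySem.List.slice s (some i) (some (i + length)))
  String.mk (parts.map (fun p => p ++ [' '])).flatten

-- ===== PRECONDITION & SPEC =====
-- Pre_ excludes length ≤ 0: at length = 0 A raises ZeroDivisionError, and for negative length
-- a "group width" is meaningless — A's modular counter and B's slicing both produce accidental,
-- mutually different spacings there, neither of which anyone would specify.
def Pre_group_str_py (str : String) (length : Int) : Prop := 0 < length
instance (str : String) (length : Int) : Decidable (Pre_group_str_py str length) := by unfold Pre_group_str_py; infer_instance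
def pvWitness_group_str_py : String × Int := ("abcde", 2)

def Spec_group_str_py (str : String) (length : Int) (out : String) : Prop := out = group_str_py_alt str length
instance (str : String) (length : Int) (out : String) : Decidable (Spec_group_str_py str length out) := by unfold Spec_group_str_py; infer_instance

-- ===== CLAIM =====
def Claim_equal_group_str_py : Prop := ∀ (str : String) (length : Int), Dom_group_str_py str length → Pre_group_str_py str length → Spec_group_str_py str length (group_str_py str length)

-- ===== LEMMAS AND PROOFS =====

-- spec-side recursion describing A's fold: space after the char that makes the counter divisible
def gA (L : Int) : List Char → Int → List Char
  | [], _ => []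
  | c :: r, i =>
      if PySem.Int.mod (i + 1) L = 0 then c :: ' ' :: gA L r (i + 1)
      else c :: gA L r (i + 1)

theorem foldl_eq_gA (L : Int) (s : List Char) (acc : List Char) (i : Int) :
    s.foldl (fun (acc : List Char × Int) c =>
      let new := acc.1 ++ [c]
      let j := acc.2 + 1
      if PySem.Int.mod j L = 0 then (new ++ [' '], j) else (new, j)) (acc, i)
    = (acc ++ gA L s i, i + s.length) := by
  induction s generalizing acc i with
  | nil => simp [gA]
  | cons c r ih =>
      simp only [List.foldl_cons, gA]
      split_ifs with h <;> rw [ih] <;> simp [Prod.ext_iff, h] <;> push_cast <;> omega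

theorem mod_zero_iff (L x : Int) (hL : 0 < L) :
    PySem.Int.mod x L = 0 ↔ ((L.toNat : Int)) ∣ x := by
  rw [Int.toNat_of_nonneg hL.le, ← PySem.Int.mod_eq_zero_iff_dvd]

-- one block: length ≤ m, counter hits a multiple of m exactly at the block's last char
theorem gA_block (L : Int) (hL : 0 < L) (t : List Char) (i : Int)
    (hpos : 0 < t.length) (hle : t.length ≤ L.toNat)
    (hdvd : ((L.toNat : Int)) ∣ (i + t.length)) :
    gA L t i = t ++ [' '] := by
  induction t generalizing i with
  | nil => simp at hpos
  | cons c r ih =>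
      cases r with
      | nil =>
          have h1 : PySem.Int.mod (i + 1) L = 0 := by
            rw [mod_zero_iff L _ hL]; simpa using hdvd
          simp [gA, h1]
      | cons d r' =>
          have hne : ¬ PySem.Int.mod (i + 1) L = 0 := by
            rw [mod_zero_iff L _ hL]
            intro hd
            have h2 : ((L.toNat : Int)) ∣ ((i + ((c :: d :: r').length : Int)) - (i + 1)) :=
              Int.dvd_sub hdvd hd
            have h3 : ((i + ((c :: d :: r').length : Int)) - (i + 1)) = ((d :: r').length : Int) := by
              simp only [List.length_cons]; push_cast; ring
            rw [h3] at h2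
            have h4 := Int.le_of_dvd (by simp only [List.length_cons]; push_cast; omega) h2
            have h5 : L.toNat ≤ (d :: r').length := by exact_mod_cast h4
            simp only [List.length_cons] at hle h5
            omega
          have hrec := ih (i := i + 1) (by simp)
            (by simp only [List.length_cons] at hle ⊢; omega)
            (by have he : (i + 1) + ((d :: r').length : Int) = i + ((c :: d :: r').length : Int) := by
                  simp only [List.length_cons]; push_cast; ring
                rw [he]; exact hdvd)
          rw [gA, if_neg hne, hrec]
          simp

theorem gA_append (L : Int) (a b : List Char) (i : Int) :
    gA L (a ++ b) i = gA L a i ++ gA L b (i + a.length) := by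
  induction a generalizing i with
  | nil => simp [gA]
  | cons c r ih =>
      simp only [List.cons_append, gA]
      split_ifs <;> rw [ih] <;> simp only [List.length_cons, List.cons_append] <;>
        push_cast <;> ring_nf

-- range(a, b, m) with 0 < m and b ≤ a is empty
theorem pyRangeP_nil (a b m : Int) (hm : 0 < m) (hab : b ≤ a) :
    PySem.List.pyRange a b m = [] := by
  rw [PySem.List.pyRange_of_pos a b hm, if_neg (by omega)]
  simp

-- range(a, b, m) with 0 < m and a < b starts with a
theorem pyRangeP_cons (a b m : Int) (hm : 0 < m) (hab : a < b) :
    PySem.List.pyRange a b m = a :: PySem.List.pyRange (a + m) b m := by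
  rw [PySem.List.pyRange_of_pos a b hm, PySem.List.pyRange_of_pos (a + m) b hm]
  have hq : ((b - a + m - 1) / m).toNat
      = (if a + m < b then ((b - (a + m) + m - 1) / m).toNat else 0) + 1 := by
    split_ifs with h
    · have h1 : (b - a + m - 1) / m = (b - a - 1) / m + 1 := by
        have h2 := Int.add_mul_ediv_right (b - a - 1) 1 (show m ≠ 0 by omega)
        have h3 : b - a - 1 + 1 * m = b - a + m - 1 := by ring
        rw [h3] at h2
        simpa using h2
      have h4 : b - (a + m) + m - 1 = b - a - 1 := by ring
      have h5 : 0 ≤ (b - a - 1) / m := Int.ediv_nonneg (by omega) (by omega)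
      rw [h1, h4]
      omega
    · have h1 : 1 ≤ (b - a + m - 1) / m := by
        rw [Int.le_ediv_iff_mul_le hm]; omega
      have h2 : (b - a + m - 1) / m < 2 := by
        rw [Int.ediv_lt_iff_lt_mul hm]; omega
      omega
  rw [if_pos hab, hq, List.range_succ_eq_map, List.map_cons]
  simp only [Nat.cast_zero, mul_zero, add_zero, List.map_map]
  congr 1
  apply List.map_congr_left
  intro x _
  simp only [Function.comp_apply]
  push_cast
  ring

-- the tail of B: whole m-sized slices, each equal to the corresponding block of A's output
theorem gA_tail (L : Int) (hL : 0 < L) (s : List Char) (fuel : Nat) :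
    ∀ (pos : Nat) (i : Int), s.length ≤ pos + fuel → pos ≤ s.length →
    (s.length - pos) % L.toNat = 0 → ((L.toNat : Int)) ∣ (i + pos) →
    gA L (s.drop pos) (i + pos)
      = (((PySem.List.pyRange (pos : Int) (s.length : Int) L).map
            (fun j => PySem.List.slice s (some j) (some (j + L)))).map
          (fun p => p ++ [' '])).flatten := by
  induction fuel with
  | zero =>
      intro pos i hf hpn _ _
      have hpe : pos = s.length := by omega
      rw [hpe, List.drop_length, pyRangeP_nil _ _ _ hL (by omega)]
      simp [gA]
  | succ f ih =>
      intro pos i hf hpn hmod hdvd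
      set m := L.toNat with hmdef
      have hm1 : 1 ≤ m := by omega
      have hLm : L = (m : Int) := by omega
      rcases Nat.eq_or_lt_of_le hpn with he | hlt
      · rw [he, List.drop_length, pyRangeP_nil _ _ _ hL (by omega)]
        simp [gA]
      · have hdvdlen : m ∣ (s.length - pos) := Nat.dvd_of_mod_eq_zero hmod
        have hchunk : pos + m ≤ s.length := by
          rcases Nat.lt_or_ge (s.length - pos) m with h | h
          · exfalso
            obtain ⟨k, hk⟩ := hdvdlen
            rcases k with _ | k
            · omega
            · have : m ≤ m * (k + 1) := Nat.le_mul_of_pos_right m (by omega)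
              omega
          · omega
        have hslice : PySem.List.slice s (some (pos : Int)) (some ((pos : Int) + L))
            = (s.drop pos).take m := by
          rw [hLm]
          exact_mod_cast PySem.List.slice_natCast_add s pos m
        have htk : ((s.drop pos).take m).length = m := by
          simp only [List.length_take, List.length_drop]; omega
        have hsplit : s.drop pos = (s.drop pos).take m ++ s.drop (pos + m) := by
          rw [← List.drop_drop]
          exact (List.take_append_drop m (s.drop pos)).symm
        have hdvdm : ((m : Int)) ∣ (m : Int) := dvd_refl _
        have hdvd2 : ((m : Int)) ∣ (i + ((pos + m : Nat) : Int)) := by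
          push_cast
          have : i + ((pos : Int) + (m : Int)) = (i + pos) + m := by ring
          rw [this]
          exact dvd_add hdvd hdvdm
        have hmod2 : (s.length - (pos + m)) % m = 0 := by
          have h2 : m ∣ (s.length - pos - m) := Nat.dvd_sub hdvdlen (dvd_refl m)
          have h3 : s.length - (pos + m) = s.length - pos - m := by omega
          obtain ⟨k, hk⟩ := h2
          rw [h3, hk]
          exact Nat.mul_mod_right m k
        conv_lhs => rw [hsplit]
        rw [gA_append, htk,
            gA_block L hL _ (i + pos) (by omega) (by omega)
              (by rw [htk]; exact dvd_add hdvd (by exact_mod_cast hdvdm))]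
        have hcons : PySem.List.pyRange (pos : Int) (s.length : Int) L
            = (pos : Int) :: PySem.List.pyRange ((pos : Int) + L) (s.length : Int) L := by
          exact pyRangeP_cons _ _ _ hL (by exact_mod_cast hlt)
        rw [hcons]
        simp only [List.map_cons, List.flatten_cons, hslice]
        have hcast : (pos : Int) + L = ((pos + m : Nat) : Int) := by
          rw [hLm]; push_cast; ring
        have hio : i + (pos : Int) + ((m : Nat) : Int) = i + ((pos + m : Nat) : Int) := by
          push_cast; ring
        rw [hio, hcast, ih (pos + m) i (by omega) hchunk hmod2 hdvd2]

-- the full correspondence on lists: A's gA from i0 equals B's parts, flattened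
theorem main_lists (L : Int) (hL : 0 < L) (s : List Char) :
    gA L s (L - PySem.Int.mod (s.length : Int) L)
    = ((((if PySem.Int.mod ((s.length : Nat) : Int) L ≠ 0 then
            [PySem.List.slice s none (some (PySem.Int.mod (s.length : Int) L))] else [])
        ++ (PySem.List.pyRange (PySem.Int.mod (s.length : Int) L) (s.length : Int) L).map
            (fun j => PySem.List.slice s (some j) (some (j + L)))).map
          (fun p => p ++ [' '])).flatten) := by
  set m := L.toNat with hmdef
  have hm1 : 1 ≤ m := by omega
  have hLm : L = (m : Int) := by omega
  set n := s.length with hndef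
  set off := n % m with hoffdef
  have hmodc : PySem.Int.mod ((n : Nat) : Int) L = ((off : Nat) : Int) := by
    rw [hLm]
    exact PySem.Int.mod_natCast n m
  have hoffm : off < m := Nat.mod_lt _ (by omega)
  have hoffn : off ≤ n := Nat.mod_le _ _
  set i0 : Int := L - PySem.Int.mod (n : Int) L with hi0def
  have hkey : ((m : Int)) ∣ (i0 + n) := by
    have h1 := PySem.Int.floordiv_mul_add_mod (n : Int) L
    have h2 : i0 + (n : Int) = (1 + PySem.Int.floordiv (n : Int) L) * L := by
      rw [hi0def]; linarith
    rw [h2, hLm]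
    exact dvd_mul_left _ _
  have hsub : m ∣ (n - off) := Nat.dvd_sub_mod n
  have hdvdblock : ((m : Int)) ∣ (i0 + (off : Int)) := by
    have hsubZ : ((m : Int)) ∣ ((n : Int) - (off : Int)) := by
      have h2 := Int.natCast_dvd_natCast.mpr hsub
      rwa [Nat.cast_sub hoffn] at h2
    have he : i0 + (off : Int) = (i0 + (n : Int)) - ((n : Int) - (off : Int)) := by ring
    rw [he]; exact Int.dvd_sub hkey hsubZ
  have hmodtail : (n - off) % m = 0 := by
    obtain ⟨k, hk⟩ := hsub
    rw [hk]
    exact Nat.mul_mod_right m k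
  rw [hmodc]
  by_cases hoff : off = 0
  · rw [if_neg (by simp [hoff])]
    have ht := gA_tail L hL s n 0 i0 (by omega) (by omega)
      (by rw [Nat.sub_zero, ← hoffdef]; exact hoff)
      (by rw [hoff, Nat.cast_zero, add_zero] at hdvdblock
          rw [Nat.cast_zero, add_zero]
          exact hdvdblock)
    rw [hoff]
    simp only [List.nil_append, List.map_map]
    simpa using ht
  · rw [if_pos (by exact_mod_cast hoff)]
    have htk : (s.take off).length = off := by
      simp only [List.length_take]; omega
    have hhead : PySem.List.slice s none (some ((off : Nat) : Int)) = s.take off :=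
      PySem.List.slice_to_natCast s off
    conv_lhs => rw [← List.take_append_drop off s]
    rw [gA_append, htk,
        gA_block L hL (s.take off) i0 (by rw [htk]; omega) (by rw [htk]; omega)
          (by rw [htk]; exact hdvdblock),
        gA_tail L hL s n off i0 (by omega) hoffn hmodtail hdvdblock]
    simp [hhead, List.append_assoc]
    rfl

-- ===== VERDICT =====
theorem group_str_py_spec : Claim_equal_group_str_py := by
  intro str length hdom hpre
  have hL : 0 < length := hpre
  show group_str_py str length = group_str_py_alt str length
  unfold group_str_py group_str_py_alt
  simp only [foldl_eq_gA]
  rw [main_lists length hL str.toList]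
  rw [List.nil_append]
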